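-- pv_equiv track=rewrite | github.com/playday3008/Lights-Out-With-Python-Sockets-Tkinter | solve.py | init_coeff_matrix
-- ===== SOURCE A (Python) =====
-- def init_coeff_matrix(x: int, y: int) -> list[list[int]]:
--     matrix = [[0 for _ in range(x * y + 1)] for _ in range(x * y)]
--     for i in range(x):
--         for j in range(y):
--             k = i * y + j
--             matrix[k][k] = 1
--             if i > 0:
--                 matrix[(i - 1) * y + j][k] = 1
--             if i < x - 1:
--                 matrix[(i + 1) * y + j][k] = 1
--             if j > 0:
--                 matrix[i * y + j - 1][k] = 1
--             if j < y - 1: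
--                 matrix[i * y + j + 1][k] = 1
--     return matrix
-- ===== SOURCE B (Python) =====
-- def init_coeff_matrix(x: int, y: int) -> list[list[int]]:
--     n = x * y
--
--     def adj(r: int, c: int) -> bool:
--         # grid adjacency via index decoding; boundaries are implicit in the decode
--         i1, j1 = divmod(r, y)
--         i2, j2 = divmod(c, y)
--         return r == c or (i1 == i2 and abs(j1 - j2) == 1) or (j1 == j2 and abs(i1 - i2) == 1)
--
--     return [[1 if c < n and adj(r, c) else 0 for c in range(n + 1)]
--             for r in range(n)]
-- ===== Notes on version B (the rewrite author's own statement) =====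
-- stated objective: alternative
-- what changed: B computes every entry of the (xy) x (xy+1) matrix directly from a symmetric adjacency predicate (decode both indices with divmod(., y), 1 iff equal or grid-neighbours), a pure nested comprehension with no preallocated matrix, no in-place writes and no boundary branches, instead of A's cell sweep that scatter-writes column k into up to five rows.
-- outside the precondition, e.g. on init_coeff_matrix(-1, -1): A returns [[0, 0]], B returns [[1, 0]]
import Mathlib
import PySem

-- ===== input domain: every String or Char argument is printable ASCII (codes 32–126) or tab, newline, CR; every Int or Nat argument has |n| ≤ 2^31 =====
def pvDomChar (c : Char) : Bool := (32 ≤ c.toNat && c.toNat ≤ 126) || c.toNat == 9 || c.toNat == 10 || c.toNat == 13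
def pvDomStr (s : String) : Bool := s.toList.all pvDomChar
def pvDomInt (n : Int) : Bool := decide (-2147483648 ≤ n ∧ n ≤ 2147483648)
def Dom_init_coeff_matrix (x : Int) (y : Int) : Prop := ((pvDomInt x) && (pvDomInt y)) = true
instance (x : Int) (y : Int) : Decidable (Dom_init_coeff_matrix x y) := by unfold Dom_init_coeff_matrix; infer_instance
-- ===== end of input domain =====

-- B derives every matrix entry pointwise from a symmetric divmod-decoded adjacency
-- predicate (no preallocated matrix, no in-place writes, no boundary branches),
-- instead of A's scatter-writing cell sweep (objective: alternative).

-- ===== PORT A =====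
-- matrix[r][c] = v ; in A every written index is in range, so the Nat .toNat set is exact
def pvMset : List (List Int) → Nat → Nat → Int → List (List Int)
  | [], _, _, _ => []
  | row :: rest, 0, c, v => row.set c v :: rest
  | row :: rest, Nat.succ r, c, v => row :: pvMset rest r c v

-- the body of A's double loop, for one (i, j)
def pvStep (x y : Int) (m : List (List Int)) (i j : Int) : List (List Int) :=
  let k := i * y + j
  let m1 := pvMset m k.toNat k.toNat 1
  let m2 := if 0 < i then pvMset m1 ((i - 1) * y + j).toNat k.toNat 1 else m1
  let m3 := if i < x - 1 then pvMset m2 ((i + 1) * y + j).toNat k.toNat 1 else m2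
  let m4 := if 0 < j then pvMset m3 (i * y + j - 1).toNat k.toNat 1 else m3
  if j < y - 1 then pvMset m4 (i * y + j + 1).toNat k.toNat 1 else m4

def init_coeff_matrix (x : Int) (y : Int) : List (List Int) :=
  let matrix := (PySem.List.pyRange 0 (x * y) 1).map
    (fun _ => (PySem.List.pyRange 0 (x * y + 1) 1).map (fun _ => (0 : Int)))
  (PySem.List.pyRange 0 x 1).foldl
    (fun m i => (PySem.List.pyRange 0 y 1).foldl (fun m j => pvStep x y m i j) m) matrix

-- ===== PORT B =====
-- adj(r, c): decode both indices with divmod(., y); grid adjacency, boundaries implicit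
def pvAdjB (y r c : Int) : Bool :=
  r == c ||
  (PySem.Int.floordiv r y == PySem.Int.floordiv c y &&
    (PySem.Int.mod r y - PySem.Int.mod c y).natAbs == 1) ||
  (PySem.Int.mod r y == PySem.Int.mod c y &&
    (PySem.Int.floordiv r y - PySem.Int.floordiv c y).natAbs == 1)

def init_coeff_matrix_alt (x : Int) (y : Int) : List (List Int) :=
  let n := x * y
  (PySem.List.pyRange 0 n 1).map (fun r =>
    (PySem.List.pyRange 0 (n + 1) 1).map (fun c =>
      if c < n ∧ pvAdjB y r c = true then (1 : Int) else 0))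

-- ===== PRECONDITION & SPEC =====
-- Pre_ excludes inputs with both dimensions negative: there x*y > 0 makes A return a
-- positive-size all-zero matrix, an artefact of the then-empty range(x) loop.
def Pre_init_coeff_matrix (x : Int) (y : Int) : Prop := 0 ≤ x ∨ 0 ≤ y
instance (x : Int) (y : Int) : Decidable (Pre_init_coeff_matrix x y) := by
  unfold Pre_init_coeff_matrix; infer_instance
def pvWitness_init_coeff_matrix : Int × Int := (2, 3)

def Spec_init_coeff_matrix (x : Int) (y : Int) (out : List (List Int)) : Prop := out = init_coeff_matrix_alt x y
instance (x : Int) (y : Int) (out : List (List Int)) : Decidable (Spec_init_coeff_matrix x y out) := by unfold Spec_init_coeff_matrix; infer_instance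

-- ===== CLAIM (what is proved, stated in full; the proofs are below) =====
def Claim_equal_init_coeff_matrix : Prop := ∀ (x : Int) (y : Int), Dom_init_coeff_matrix x y → Pre_init_coeff_matrix x y → Spec_init_coeff_matrix x y (init_coeff_matrix x y)

-- ===== LEMMAS AND PROOFS =====

-- entry access (0 outside range; A only reads/writes in range)
def pvGet (m : List (List Int)) (r c : Nat) : Int := (m.getD r []).getD c 0

def pvShape (m : List (List Int)) (N : Nat) : Prop :=
  m.length = N ∧ ∀ row ∈ m, row.length = N + 1

-- which (r, c) entries the iteration (i, j) of A writes
def pvHit (x y i j : Int) (r c : Nat) : Prop :=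
  (c : Int) = i * y + j ∧
    ((r : Int) = i * y + j ∨
     (0 < i ∧ (r : Int) = (i - 1) * y + j) ∨
     (i < x - 1 ∧ (r : Int) = (i + 1) * y + j) ∨
     (0 < j ∧ (r : Int) = i * y + j - 1) ∨
     (j < y - 1 ∧ (r : Int) = i * y + j + 1))

def pvInv (N : Nat) (m : List (List Int)) (Q : Nat → Nat → Prop) : Prop :=
  ∀ r c, r < N → c < N + 1 → (Q r c ∧ pvGet m r c = 1) ∨ (¬ Q r c ∧ pvGet m r c = 0)

lemma pvMset_nil (r c : Nat) (v : Int) : pvMset [] r c v = [] := by cases r <;> rfl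

lemma pvStep_nil (x y i j : Int) : pvStep x y [] i j = [] := by
  simp [pvStep, pvMset_nil]

lemma pvMset_length (m : List (List Int)) (r c : Nat) (v : Int) :
    (pvMset m r c v).length = m.length := by
  induction m generalizing r with
  | nil => simp [pvMset_nil]
  | cons row rest ih => cases r <;> simp [pvMset, ih]

lemma pvMset_rows (m : List (List Int)) (r c : Nat) (v : Int) (L : Nat)
    (h : ∀ row ∈ m, row.length = L) :
    ∀ row ∈ pvMset m r c v, row.length = L := by
  induction m generalizing r with
  | nil => simp [pvMset_nil]
  | cons row rest ih =>
    cases r with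
    | zero =>
      intro q hq
      rcases List.mem_cons.1 hq with h1 | h1
      · subst h1; simpa using h row (by simp)
      · exact h q (by simp [h1])
    | succ r =>
      intro q hq
      rcases List.mem_cons.1 hq with h1 | h1
      · subst h1; exact h q (by simp)
      · exact ih r (fun p hp => h p (by simp [hp])) q h1

lemma pvMset_shape (m : List (List Int)) (r c : Nat) (v : Int) (N : Nat)
    (h : pvShape m N) : pvShape (pvMset m r c v) N :=
  ⟨by simp [pvMset_length, h.1], pvMset_rows m r c v (N + 1) h.2⟩

lemma pvMset_getD (m : List (List Int)) (r c : Nat) (v : Int) (r' : Nat) :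
    (pvMset m r c v).getD r' [] =
      if r' = r then (m.getD r []).set c v else m.getD r' [] := by
  induction m generalizing r r' with
  | nil => simp [pvMset_nil]
  | cons row rest ih =>
    cases r with
    | zero => cases r' <;> simp [pvMset]
    | succ r =>
      cases r' with
      | zero => simp [pvMset]
      | succ r' => simpa [pvMset] using ih r r'

lemma pvSet_getD (row : List Int) (c : Nat) (v : Int) (c' : Nat) (hc : c < row.length) :
    (row.set c v).getD c' 0 = if c' = c then v else row.getD c' 0 := by
  by_cases h : c' = c
  · subst h; simp [List.getD_eq_getElem?_getD, hc]
  · simp [List.getD_eq_getElem?_getD, List.getElem?_set_ne (by omega : c ≠ c'), h]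

lemma pvGet_mset (m : List (List Int)) (N : Nat) (hs : pvShape m N)
    (r0 c0 : Nat) (hr0 : r0 < N) (hc0 : c0 < N + 1) (v : Int) (r c : Nat) :
    pvGet (pvMset m r0 c0 v) r c =
      if r = r0 ∧ c = c0 then v else pvGet m r c := by
  unfold pvGet
  rw [pvMset_getD]
  by_cases hr : r = r0
  · subst hr
    have hlen0 : m.length = N := hs.1
    have hmem : m.getD r [] ∈ m := by
      rw [List.getD_eq_getElem m [] (by omega : r < m.length)]
      exact List.getElem_mem _
    have hlen : (m.getD r []).length = N + 1 := hs.2 _ hmem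
    rw [if_pos rfl, pvSet_getD _ _ _ _ (by omega)]
    by_cases hc : c = c0 <;> simp [hc]
  · simp [hr]

lemma pvInv_congr (N : Nat) (m : List (List Int)) (Q Q' : Nat → Nat → Prop)
    (h : ∀ r c, r < N → c < N + 1 → (Q r c ↔ Q' r c)) (hi : pvInv N m Q) :
    pvInv N m Q' := by
  intro r c hr hc
  rcases hi r c hr hc with ⟨hq, hv⟩ | ⟨hq, hv⟩
  · exact Or.inl ⟨(h r c hr hc).1 hq, hv⟩
  · exact Or.inr ⟨fun hh => hq ((h r c hr hc).2 hh), hv⟩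

lemma pvInv_mset (N : Nat) (m : List (List Int)) (Q : Nat → Nat → Prop)
    (hs : pvShape m N) (r0 c0 : Nat) (hr0 : r0 < N) (hc0 : c0 < N + 1)
    (h : pvInv N m Q) :
    pvInv N (pvMset m r0 c0 1) (fun r c => (r = r0 ∧ c = c0) ∨ Q r c) := by
  intro r c hr hc
  rw [pvGet_mset m N hs r0 c0 hr0 hc0 1 r c]
  by_cases he : r = r0 ∧ c = c0
  · exact Or.inl ⟨Or.inl he, by simp [he]⟩
  · rw [if_neg he]
    rcases h r c hr hc with ⟨hq, hv⟩ | ⟨hq, hv⟩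
    · exact Or.inl ⟨Or.inr hq, hv⟩
    · exact Or.inr ⟨by tauto, hv⟩

lemma pvInv_gwrite (N : Nat) (m : List (List Int)) (Q : Nat → Nat → Prop)
    (b : Prop) [Decidable b] (r0 c0 : Nat) (hr0 : b → r0 < N) (hc0 : c0 < N + 1)
    (hs : pvShape m N) (h : pvInv N m Q) :
    pvShape (if b then pvMset m r0 c0 1 else m) N ∧
    pvInv N (if b then pvMset m r0 c0 1 else m)
      (fun r c => (b ∧ r = r0 ∧ c = c0) ∨ Q r c) := by
  by_cases hb : b
  · rw [if_pos hb]
    exact ⟨pvMset_shape _ _ _ _ _ hs,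
      pvInv_congr _ _ _ _ (by tauto) (pvInv_mset N m Q hs r0 c0 (hr0 hb) hc0 h)⟩
  · rw [if_neg hb]
    exact ⟨hs, pvInv_congr _ _ _ _ (by tauto) h⟩

lemma pvStep_inv (x y : Int) (N : Nat) (hN : (N : Int) = x * y) (i j : Int)
    (hi0 : 0 ≤ i) (hix : i < x) (hj0 : 0 ≤ j) (hjy : j < y)
    (m : List (List Int)) (Q : Nat → Nat → Prop)
    (hs : pvShape m N) (h : pvInv N m Q) :
    pvShape (pvStep x y m i j) N ∧
    pvInv N (pvStep x y m i j) (fun r c => pvHit x y i j r c ∨ Q r c) := by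
  have hy0 : 0 < y := lt_of_le_of_lt hj0 hjy
  have hk0 : 0 ≤ i * y + j := by positivity
  have hkN : i * y + j < (N : Int) := by rw [hN]; nlinarith
  have h20 : 0 < i → 0 ≤ (i - 1) * y + j := fun hb => by nlinarith
  have h2N : 0 < i → (i - 1) * y + j < (N : Int) := fun hb => by rw [hN]; nlinarith
  have h30 : i < x - 1 → 0 ≤ (i + 1) * y + j := fun hb => by positivity
  have h3N : i < x - 1 → (i + 1) * y + j < (N : Int) := fun hb => by rw [hN]; nlinarith
  have h40 : 0 < j → 0 ≤ i * y + j - 1 := fun hb => by nlinarith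
  have h4N : 0 < j → i * y + j - 1 < (N : Int) := fun hb => by rw [hN]; nlinarith
  have h50 : 0 < j + 1 → 0 ≤ i * y + j + 1 := fun hb => by positivity
  have h5N : j < y - 1 → i * y + j + 1 < (N : Int) := fun hb => by rw [hN]; nlinarith
  simp only [pvStep]
  have hc0 : (i * y + j).toNat < N + 1 := by omega
  have hr1 : (i * y + j).toNat < N := by omega
  have hinv1 := pvInv_mset N m Q hs _ _ hr1 hc0 h
  have hs1 := pvMset_shape m ((i * y + j).toNat) ((i * y + j).toNat) 1 N hs
  obtain ⟨hs2, hinv2⟩ := pvInv_gwrite N _ _ (0 < i) ((i - 1) * y + j).toNat ((i * y + j).toNat)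
    (fun hb => by have := h20 hb; have := h2N hb; omega) hc0 hs1 hinv1
  obtain ⟨hs3, hinv3⟩ := pvInv_gwrite N _ _ (i < x - 1) ((i + 1) * y + j).toNat ((i * y + j).toNat)
    (fun hb => by have := h30 hb; have := h3N hb; omega) hc0 hs2 hinv2
  obtain ⟨hs4, hinv4⟩ := pvInv_gwrite N _ _ (0 < j) (i * y + j - 1).toNat ((i * y + j).toNat)
    (fun hb => by have := h40 hb; have := h4N hb; omega) hc0 hs3 hinv3
  obtain ⟨hs5, hinv5⟩ := pvInv_gwrite N _ _ (j < y - 1) (i * y + j + 1).toNat ((i * y + j).toNat)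
    (fun hb => by have := h50 (by omega); have := h5N hb; omega) hc0 hs4 hinv4
  refine ⟨hs5, pvInv_congr _ _ _ _ ?_ hinv5⟩
  intro r c hr hc
  have ec : c = (i * y + j).toNat ↔ (c : Int) = i * y + j := by omega
  have e1 : r = (i * y + j).toNat ↔ (r : Int) = i * y + j := by omega
  have e2 : 0 < i → (r = ((i - 1) * y + j).toNat ↔ (r : Int) = (i - 1) * y + j) :=
    fun hb => by have := h20 hb; omega
  have e3 : i < x - 1 → (r = ((i + 1) * y + j).toNat ↔ (r : Int) = (i + 1) * y + j) :=
    fun hb => by have := h30 hb; omega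
  have e4 : 0 < j → (r = (i * y + j - 1).toNat ↔ (r : Int) = i * y + j - 1) :=
    fun hb => by have := h40 hb; omega
  have e5 : j < y - 1 → (r = (i * y + j + 1).toNat ↔ (r : Int) = i * y + j + 1) :=
    fun hb => by have := h50 (by omega); omega
  unfold pvHit
  constructor
  · rintro (⟨hb, h1, h2⟩ | ⟨hb, h1, h2⟩ | ⟨hb, h1, h2⟩ | ⟨hb, h1, h2⟩ | ⟨h1, h2⟩ | hQ)
    · exact Or.inl ⟨ec.1 h2, Or.inr (Or.inr (Or.inr (Or.inr ⟨hb, (e5 hb).1 h1⟩)))⟩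
    · exact Or.inl ⟨ec.1 h2, Or.inr (Or.inr (Or.inr (Or.inl ⟨hb, (e4 hb).1 h1⟩)))⟩
    · exact Or.inl ⟨ec.1 h2, Or.inr (Or.inr (Or.inl ⟨hb, (e3 hb).1 h1⟩))⟩
    · exact Or.inl ⟨ec.1 h2, Or.inr (Or.inl ⟨hb, (e2 hb).1 h1⟩)⟩
    · exact Or.inl ⟨ec.1 h2, Or.inl (e1.1 h1)⟩
    · exact Or.inr hQ
  · rintro (⟨h2, h1 | ⟨hb, h1⟩ | ⟨hb, h1⟩ | ⟨hb, h1⟩ | ⟨hb, h1⟩⟩ | hQ)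
    · exact Or.inr (Or.inr (Or.inr (Or.inr (Or.inl ⟨e1.2 h1, ec.2 h2⟩))))
    · exact Or.inr (Or.inr (Or.inr (Or.inl ⟨hb, (e2 hb).2 h1, ec.2 h2⟩)))
    · exact Or.inr (Or.inr (Or.inl ⟨hb, (e3 hb).2 h1, ec.2 h2⟩))
    · exact Or.inr (Or.inl ⟨hb, (e4 hb).2 h1, ec.2 h2⟩)
    · exact Or.inl ⟨hb, (e5 hb).2 h1, ec.2 h2⟩
    · exact Or.inr (Or.inr (Or.inr (Or.inr (Or.inr hQ))))

lemma pvFold_inv (x y : Int) (N : Nat) (hN : (N : Int) = x * y)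
    (ps : List (Int × Int)) (m : List (List Int)) (Q : Nat → Nat → Prop)
    (hb : ∀ p ∈ ps, 0 ≤ p.1 ∧ p.1 < x ∧ 0 ≤ p.2 ∧ p.2 < y)
    (hs : pvShape m N) (h : pvInv N m Q) :
    pvShape (ps.foldl (fun m p => pvStep x y m p.1 p.2) m) N ∧
    pvInv N (ps.foldl (fun m p => pvStep x y m p.1 p.2) m)
      (fun r c => (∃ p ∈ ps, pvHit x y p.1 p.2 r c) ∨ Q r c) := by
  induction ps generalizing m Q with
  | nil =>
    exact ⟨hs, pvInv_congr _ _ _ _ (by simp) h⟩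
  | cons p ps ih =>
    obtain ⟨hp, hps⟩ := List.forall_mem_cons.1 hb
    obtain ⟨hs1, hinv1⟩ := pvStep_inv x y N hN p.1 p.2 hp.1 hp.2.1 hp.2.2.1 hp.2.2.2 m Q hs h
    obtain ⟨hs2, hinv2⟩ := ih _ _ hps hs1 hinv1
    refine ⟨hs2, pvInv_congr _ _ _ _ ?_ hinv2⟩
    intro r c _ _
    simp only [List.mem_cons]
    constructor
    · rintro (⟨q, hq, hh⟩ | hh | hQ)
      · exact Or.inl ⟨q, Or.inr hq, hh⟩
      · exact Or.inl ⟨p, Or.inl rfl, hh⟩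
      · exact Or.inr hQ
    · rintro (⟨q, rfl | hq, hh⟩ | hQ)
      · exact Or.inr (Or.inl hh)
      · exact Or.inl ⟨q, hq, hh⟩
      · exact Or.inr (Or.inr hQ)

lemma pvFoldl_nested {M : Type} (step : M → Int → Int → M) (is js : List Int) (m0 : M) :
    is.foldl (fun m i => js.foldl (fun m j => step m i j) m) m0
      = (is.flatMap (fun i => js.map (fun j => (i, j)))).foldl
          (fun m p => step m p.1 p.2) m0 := by
  induction is generalizing m0 with
  | nil => rfl
  | cons i is ih => simp [List.flatMap_cons, List.foldl_append, List.foldl_map, ih]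

lemma pvConstRow_getD (l : List Int) (c : Nat) :
    ((l.map fun _ => (0 : Int)).getD c 0) = 0 := by
  rw [List.getD_eq_getElem?_getD, List.getElem?_map]
  cases l[c]? <;> simp

lemma pvGet_zeroMatrix (n : Int) (r c : Nat) :
    pvGet ((PySem.List.pyRange 0 n 1).map
      (fun _ => (PySem.List.pyRange 0 (n + 1) 1).map (fun _ => (0 : Int)))) r c = 0 := by
  unfold pvGet
  have houter : ((PySem.List.pyRange 0 n 1).map
      (fun _ => (PySem.List.pyRange 0 (n + 1) 1).map (fun _ => (0 : Int)))).getD r [] = [] ∨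
      ((PySem.List.pyRange 0 n 1).map
      (fun _ => (PySem.List.pyRange 0 (n + 1) 1).map (fun _ => (0 : Int)))).getD r []
        = (PySem.List.pyRange 0 (n + 1) 1).map (fun _ => (0 : Int)) := by
    rw [List.getD_eq_getElem?_getD, List.getElem?_map]
    cases (PySem.List.pyRange 0 n 1)[r]? <;> simp
  rcases houter with h | h <;> rw [h]
  · simp
  · exact pvConstRow_getD _ c

lemma pvDivmod_unique (y : Int) (hy : 0 < y) (i j : Int) (h0 : 0 ≤ j) (h1 : j < y) :
    (i * y + j) / y = i ∧ (i * y + j) % y = j := by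
  have hd : (i * y + j) / y = i := by
    rw [add_comm, Int.add_mul_ediv_right _ _ (ne_of_gt hy),
      Int.ediv_eq_zero_of_lt h0 h1, zero_add]
  refine ⟨hd, ?_⟩
  have h2 := Int.mul_ediv_add_emod (i * y + j) y
  rw [hd] at h2
  have h3 : y * i = i * y := mul_comm _ _
  omega

-- the columns at which A's five writes can put a one into row r (scatter view, guarded)
def pvNbr (x y : Int) (r c : Nat) : Prop :=
  (c : Int) = (r : Int) ∨
  (0 < PySem.Int.floordiv (r : Int) y ∧ (c : Int) = (r : Int) - y) ∨
  (PySem.Int.floordiv (r : Int) y < x - 1 ∧ (c : Int) = (r : Int) + y) ∨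
  (0 < PySem.Int.mod (r : Int) y ∧ (c : Int) = (r : Int) - 1) ∨
  (PySem.Int.mod (r : Int) y < y - 1 ∧ (c : Int) = (r : Int) + 1)

lemma pvHit_iff (x y : Int) (hy : 0 < y) (r c : Nat)
    (hr : (r : Int) < x * y) (_hc : (c : Int) < x * y) :
    (∃ i j, (0 ≤ i ∧ i < x ∧ 0 ≤ j ∧ j < y) ∧ pvHit x y i j r c) ↔ pvNbr x y r c := by
  have hNbr : pvNbr x y r c ↔
      ((c : Int) = (r : Int) ∨
       (0 < (r : Int) / y ∧ (c : Int) = (r : Int) - y) ∨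
       ((r : Int) / y < x - 1 ∧ (c : Int) = (r : Int) + y) ∨
       (0 < (r : Int) % y ∧ (c : Int) = (r : Int) - 1) ∨
       ((r : Int) % y < y - 1 ∧ (c : Int) = (r : Int) + 1)) := by
    simp [pvNbr, PySem.Int.floordiv_eq_ediv_of_pos hy, PySem.Int.mod_eq_emod_of_pos hy]
  rw [hNbr]
  have hrec1 : y * ((r : Int) / y) + (r : Int) % y = (r : Int) := Int.mul_ediv_add_emod _ _
  have hJ1a : 0 ≤ (r : Int) % y := Int.emod_nonneg _ (ne_of_gt hy)
  have hJ1b : (r : Int) % y < y := Int.emod_lt_of_pos _ hy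
  have hI1a : 0 ≤ (r : Int) / y := Int.ediv_nonneg (by positivity) (le_of_lt hy)
  have hI1b : (r : Int) / y < x := (Int.ediv_lt_iff_lt_mul hy).2 (by linarith [hr])
  constructor
  · rintro ⟨i, j, ⟨hi0, hix, hj0, hjy⟩, hceq, hcase⟩
    rcases hcase with h1 | ⟨hb, h1⟩ | ⟨hb, h1⟩ | ⟨hb, h1⟩ | ⟨hb, h1⟩
    · left; omega
    · obtain ⟨hdq, hmq⟩ := pvDivmod_unique y hy (i - 1) j hj0 hjy
      have hI1 : (r : Int) / y = i - 1 := by rw [h1, hdq]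
      have hring : (i - 1) * y = i * y - y := by ring
      refine Or.inr (Or.inr (Or.inl ⟨by omega, by omega⟩))
    · obtain ⟨hdq, hmq⟩ := pvDivmod_unique y hy (i + 1) j hj0 hjy
      have hI1 : (r : Int) / y = i + 1 := by rw [h1, hdq]
      have hring : (i + 1) * y = i * y + y := by ring
      refine Or.inr (Or.inl ⟨by omega, by omega⟩)
    · have h1' : (r : Int) = i * y + (j - 1) := by linarith
      obtain ⟨hdq, hmq⟩ := pvDivmod_unique y hy i (j - 1) (by omega) (by omega)
      have hJ1 : (r : Int) % y = j - 1 := by rw [h1', hmq]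
      refine Or.inr (Or.inr (Or.inr (Or.inr ⟨by omega, by omega⟩)))
    · have h1' : (r : Int) = i * y + (j + 1) := by linarith
      obtain ⟨hdq, hmq⟩ := pvDivmod_unique y hy i (j + 1) (by omega) (by omega)
      have hJ1 : (r : Int) % y = j + 1 := by rw [h1', hmq]
      refine Or.inr (Or.inr (Or.inr (Or.inl ⟨by omega, by omega⟩)))
  · intro hcase
    rcases hcase with h1 | ⟨hb, h1⟩ | ⟨hb, h1⟩ | ⟨hb, h1⟩ | ⟨hb, h1⟩
    · refine ⟨(r : Int) / y, (r : Int) % y, ⟨hI1a, hI1b, hJ1a, hJ1b⟩,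
        by rw [mul_comm]; omega, Or.inl (by rw [mul_comm]; omega)⟩
    · have hring : ((r : Int) / y - 1) * y = y * ((r : Int) / y) - y := by ring
      have hring2 : ((r : Int) / y - 1 + 1) * y = y * ((r : Int) / y) := by ring
      exact ⟨(r : Int) / y - 1, (r : Int) % y, ⟨by omega, by omega, hJ1a, hJ1b⟩,
        by omega, Or.inr (Or.inr (Or.inl ⟨by omega, by omega⟩))⟩
    · have hring : ((r : Int) / y + 1) * y = y * ((r : Int) / y) + y := by ring
      have hring2 : ((r : Int) / y + 1 - 1) * y = y * ((r : Int) / y) := by ring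
      exact ⟨(r : Int) / y + 1, (r : Int) % y, ⟨by omega, by omega, hJ1a, hJ1b⟩,
        by omega, Or.inr (Or.inl ⟨by omega, by omega⟩)⟩
    · have hring : (r : Int) / y * y = y * ((r : Int) / y) := by ring
      exact ⟨(r : Int) / y, (r : Int) % y - 1, ⟨hI1a, hI1b, by omega, by omega⟩,
        by omega, Or.inr (Or.inr (Or.inr (Or.inr ⟨by omega, by omega⟩)))⟩
    · have hring : (r : Int) / y * y = y * ((r : Int) / y) := by ring
      exact ⟨(r : Int) / y, (r : Int) % y + 1, ⟨hI1a, hI1b, by omega, by omega⟩,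
        by omega, Or.inr (Or.inr (Or.inr (Or.inl ⟨by omega, by omega⟩)))⟩

-- B's symmetric predicate agrees with A's guarded scatter columns on in-range indices
lemma pvNbr_iff_adj (x y : Int) (hy : 0 < y) (r c : Nat)
    (hr : (r : Int) < x * y) (hc : (c : Int) < x * y) :
    pvNbr x y r c ↔ pvAdjB y (r : Int) (c : Int) = true := by
  have hfd : ∀ z : Int, PySem.Int.floordiv z y = z / y :=
    fun z => PySem.Int.floordiv_eq_ediv_of_pos hy
  have hmd : ∀ z : Int, PySem.Int.mod z y = z % y :=
    fun z => PySem.Int.mod_eq_emod_of_pos hy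
  have hrecR : y * ((r : Int) / y) + (r : Int) % y = (r : Int) := Int.mul_ediv_add_emod _ _
  have hrecC : y * ((c : Int) / y) + (c : Int) % y = (c : Int) := Int.mul_ediv_add_emod _ _
  have hJr0 : 0 ≤ (r : Int) % y := Int.emod_nonneg _ (ne_of_gt hy)
  have hJrY : (r : Int) % y < y := Int.emod_lt_of_pos _ hy
  have hJc0 : 0 ≤ (c : Int) % y := Int.emod_nonneg _ (ne_of_gt hy)
  have hJcY : (c : Int) % y < y := Int.emod_lt_of_pos _ hy
  have hIr0 : 0 ≤ (r : Int) / y := Int.ediv_nonneg (by positivity) (le_of_lt hy)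
  have hIrX : (r : Int) / y < x := (Int.ediv_lt_iff_lt_mul hy).2 (by linarith [hr])
  have hIc0 : 0 ≤ (c : Int) / y := Int.ediv_nonneg (by positivity) (le_of_lt hy)
  have hIcX : (c : Int) / y < x := (Int.ediv_lt_iff_lt_mul hy).2 (by linarith [hc])
  have hAdj : pvAdjB y (r : Int) (c : Int) = true ↔
      ((r : Int) = (c : Int) ∨
       ((r : Int) / y = (c : Int) / y ∧ ((r : Int) % y - (c : Int) % y).natAbs = 1) ∨
       ((r : Int) % y = (c : Int) % y ∧ ((r : Int) / y - (c : Int) / y).natAbs = 1)) := by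
    simp only [pvAdjB, hfd, hmd, Bool.or_eq_true, Bool.and_eq_true, beq_iff_eq,
      Nat.cast_inj]
    tauto
  rw [hAdj]
  unfold pvNbr
  rw [hfd, hmd]
  constructor
  · rintro (h1 | ⟨hb, h1⟩ | ⟨hb, h1⟩ | ⟨hb, h1⟩ | ⟨hb, h1⟩)
    · left; omega
    · -- c = r - y : same column, c/y = r/y - 1
      have : (c : Int) = ((r : Int) / y - 1) * y + (r : Int) % y := by
        have : ((r : Int) / y - 1) * y = y * ((r : Int) / y) - y := by ring
        omega
      obtain ⟨hdq, hmq⟩ := pvDivmod_unique y hy ((r : Int) / y - 1) ((r : Int) % y) hJr0 hJrY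
      rw [this] at *
      refine Or.inr (Or.inr ⟨by omega, by omega⟩)
    · have : (c : Int) = ((r : Int) / y + 1) * y + (r : Int) % y := by
        have : ((r : Int) / y + 1) * y = y * ((r : Int) / y) + y := by ring
        omega
      obtain ⟨hdq, hmq⟩ := pvDivmod_unique y hy ((r : Int) / y + 1) ((r : Int) % y) hJr0 hJrY
      rw [this] at *
      refine Or.inr (Or.inr ⟨by omega, by omega⟩)
    · have : (c : Int) = ((r : Int) / y) * y + ((r : Int) % y - 1) := by
        have : ((r : Int) / y) * y = y * ((r : Int) / y) := by ring
        omega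
      obtain ⟨hdq, hmq⟩ := pvDivmod_unique y hy ((r : Int) / y) ((r : Int) % y - 1)
        (by omega) (by omega)
      rw [this] at *
      refine Or.inr (Or.inl ⟨by omega, by omega⟩)
    · have : (c : Int) = ((r : Int) / y) * y + ((r : Int) % y + 1) := by
        have : ((r : Int) / y) * y = y * ((r : Int) / y) := by ring
        omega
      obtain ⟨hdq, hmq⟩ := pvDivmod_unique y hy ((r : Int) / y) ((r : Int) % y + 1)
        (by omega) (by omega)
      rw [this] at *
      refine Or.inr (Or.inl ⟨by omega, by omega⟩)
  · rintro (h1 | ⟨hb, h1⟩ | ⟨hb, h1⟩)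
    · left; omega
    · -- same row, columns differ by 1
      have hd : (c : Int) - (r : Int) = (c : Int) % y - (r : Int) % y := by
        have : y * ((r : Int) / y) = y * ((c : Int) / y) := by rw [hb]
        omega
      rcases (by omega : (r : Int) % y - (c : Int) % y = 1 ∨ (r : Int) % y - (c : Int) % y = -1) with h | h
      · refine Or.inr (Or.inr (Or.inr (Or.inl ⟨by omega, by omega⟩)))
      · refine Or.inr (Or.inr (Or.inr (Or.inr ⟨by omega, by omega⟩)))
    · -- same column, rows differ by 1
      have hd : (c : Int) - (r : Int) = y * ((c : Int) / y) - y * ((r : Int) / y) := by omega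
      rcases (by omega : (r : Int) / y - (c : Int) / y = 1 ∨ (r : Int) / y - (c : Int) / y = -1) with h | h
      · have : (c : Int) - (r : Int) = -y := by
          have : y * ((c : Int) / y) = y * ((r : Int) / y) - y := by
            have hcq : (c : Int) / y = (r : Int) / y - 1 := by omega
            rw [hcq]; ring
          omega
        refine Or.inr (Or.inl ⟨by omega, by omega⟩)
      · have : (c : Int) - (r : Int) = y := by
          have : y * ((c : Int) / y) = y * ((r : Int) / y) + y := by
            have hcq : (c : Int) / y = (r : Int) / y + 1 := by omega
            rw [hcq]; ring
          omega
        refine Or.inr (Or.inr (Or.inl ⟨by omega, by omega⟩))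

lemma pvInnerFold_nil (x y i : Int) (js : List Int) :
    js.foldl (fun m j => pvStep x y m i j) [] = [] := by
  induction js with
  | nil => rfl
  | cons j js ih => simp [List.foldl_cons, pvStep_nil, ih]

lemma pvOuterFold_nil (x y : Int) (is js : List Int) :
    is.foldl (fun m i => js.foldl (fun m j => pvStep x y m i j) m) [] = [] := by
  induction is with
  | nil => rfl
  | cons i is ih => simp [List.foldl_cons, pvInnerFold_nil, ih]

-- ===== VERDICT (by name: the statement is the Claim_ definition above) =====
theorem init_coeff_matrix_spec : Claim_equal_init_coeff_matrix := by
  intro x y _ hpre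
  unfold Spec_init_coeff_matrix
  simp only [init_coeff_matrix, init_coeff_matrix_alt]
  by_cases hn : x * y ≤ 0
  · simp only [PySem.List.pyRange_one_eq_nil hn, List.map_nil]
    exact pvOuterFold_nil x y _ _
  · push Not at hn
    have hx : 0 < x := by
      by_contra hx0
      push Not at hx0
      rcases hpre with h | h
      · have hx00 : x = 0 := le_antisymm hx0 h
        rw [hx00, zero_mul] at hn; exact lt_irrefl 0 hn
      · nlinarith
    have hy : 0 < y := by
      by_contra hy0
      push Not at hy0
      rcases hpre with h | h
      · nlinarith
      · have hy00 : y = 0 := le_antisymm hy0 h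
        rw [hy00, mul_zero] at hn; exact lt_irrefl 0 hn
    set N := (x * y).toNat with hNdef
    have hN : (N : Int) = x * y := Int.toNat_of_nonneg (le_of_lt hn)
    have hs0 : pvShape ((PySem.List.pyRange 0 (x * y) 1).map
        (fun _ => (PySem.List.pyRange 0 (x * y + 1) 1).map (fun _ => (0 : Int)))) N := by
      constructor
      · simp [PySem.List.length_pyRange_one, hNdef]
      · intro row hrow
        rw [List.mem_map] at hrow
        obtain ⟨a, _, rfl⟩ := hrow
        simp [PySem.List.length_pyRange_one]
        omega
    have hi0 : pvInv N ((PySem.List.pyRange 0 (x * y) 1).map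
        (fun _ => (PySem.List.pyRange 0 (x * y + 1) 1).map (fun _ => (0 : Int))))
        (fun _ _ => False) := by
      intro r c _ _
      exact Or.inr ⟨fun f => f, pvGet_zeroMatrix (x * y) r c⟩
    rw [pvFoldl_nested (pvStep x y)]
    set ps := (PySem.List.pyRange 0 x 1).flatMap
      (fun i => (PySem.List.pyRange 0 y 1).map (fun j => (i, j))) with hps
    set A' := ps.foldl (fun m p => pvStep x y m p.1 p.2)
      ((PySem.List.pyRange 0 (x * y) 1).map
        (fun _ => (PySem.List.pyRange 0 (x * y + 1) 1).map (fun _ => (0 : Int)))) with hA'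
    have hbounds : ∀ p ∈ ps, 0 ≤ p.1 ∧ p.1 < x ∧ 0 ≤ p.2 ∧ p.2 < y := by
      intro p hp
      rw [hps, List.mem_flatMap] at hp
      obtain ⟨i, hi, hp2⟩ := hp
      rw [List.mem_map] at hp2
      obtain ⟨j, hj, rfl⟩ := hp2
      rw [PySem.List.mem_pyRange_one] at hi hj
      exact ⟨hi.1, hi.2, hj.1, hj.2⟩
    obtain ⟨hsA, hinvA⟩ := pvFold_inv x y N hN ps _ _ hbounds hs0 hi0
    rw [← hA'] at hsA hinvA
    have hQ : ∀ r c : Nat, ((∃ p ∈ ps, pvHit x y p.1 p.2 r c) ∨ False) ↔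
        ∃ i j, (0 ≤ i ∧ i < x ∧ 0 ≤ j ∧ j < y) ∧ pvHit x y i j r c := by
      intro r c
      constructor
      · rintro (⟨p, hp, hh⟩ | f)
        · exact ⟨p.1, p.2, hbounds p hp, hh⟩
        · exact f.elim
      · rintro ⟨i, j, hb, hh⟩
        refine Or.inl ⟨(i, j), ?_, hh⟩
        rw [hps, List.mem_flatMap]
        refine ⟨i, ?_, ?_⟩
        · rw [PySem.List.mem_pyRange_one]; exact ⟨hb.1, hb.2.1⟩
        · rw [List.mem_map]
          exact ⟨j, by rw [PySem.List.mem_pyRange_one]; exact ⟨hb.2.2.1, hb.2.2.2⟩, rfl⟩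
    apply List.ext_getElem
    · rw [hsA.1]
      simp [PySem.List.length_pyRange_one]
      omega
    · intro r h1 h2
      have hrN : r < N := by rw [← hsA.1]; exact h1
      have hrInt : (r : Int) < x * y := by
        rw [← hN]; exact_mod_cast hrN
      apply List.ext_getElem
      · rw [hsA.2 _ (List.getElem_mem h1)]
        simp [List.getElem_map, PySem.List.length_pyRange_one]
        omega
      · intro c hc1 hc2
        have hcN1 : c < N + 1 := by
          rw [← hsA.2 _ (List.getElem_mem h1)]; exact hc1
        have hget : (A'[r]'h1)[c]'hc1 = pvGet A' r c := by
          unfold pvGet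
          rw [List.getD_eq_getElem _ [] h1, List.getD_eq_getElem _ 0 hc1]
        have hgetB : (((PySem.List.pyRange 0 (x * y) 1).map (fun r =>
            (PySem.List.pyRange 0 (x * y + 1) 1).map (fun c =>
              if c < x * y ∧ pvAdjB y r c = true then (1 : Int) else 0)))[r]'h2)[c]'hc2
            = (if (c : Int) < x * y ∧ pvAdjB y (r : Int) (c : Int) = true then (1 : Int) else 0) := by
          simp only [List.getElem_map, PySem.List.getElem_pyRange_one, zero_add]
        rw [hget, hgetB]
        rcases hinvA r c hrN hcN1 with ⟨hq, hv⟩ | ⟨hq, hv⟩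
        · obtain ⟨i, j, ⟨hi0, hix, hj0, hjy⟩, hh⟩ := (hQ r c).1 hq
          have hcInt : (c : Int) < x * y := by
            have h1' : (c : Int) = i * y + j := hh.1
            nlinarith
          have hadj : pvAdjB y (r : Int) (c : Int) = true :=
            (pvNbr_iff_adj x y hy r c hrInt hcInt).1
              ((pvHit_iff x y hy r c hrInt hcInt).1 ⟨i, j, ⟨hi0, hix, hj0, hjy⟩, hh⟩)
          rw [hv, if_pos ⟨hcInt, hadj⟩]
        · rw [hv]
          by_cases hcn : (c : Int) < x * y
          · rw [if_neg]
            rintro ⟨-, hadj⟩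
            exact hq ((hQ r c).2 ((pvHit_iff x y hy r c hrInt hcn).2
              ((pvNbr_iff_adj x y hy r c hrInt hcn).2 hadj)))
          · rw [if_neg (by tauto)]
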